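-- pv_equiv track=rewrite | github.com/PeterBeattie19/HackerRank | Python/CompressTheStrign.py | split_by_similar
-- ===== SOURCE A (Python) =====
-- def split_by_similar(s):
--     res = []
--     pos, end = 0, 0
--     while pos < len(s):
--         c = s[pos]
--         end = pos + 1
--         while end < len(s) and s[end] == c:
--             end += 1
--         res.append(s[pos:end])
--         pos = end
--     return res
-- ===== SOURCE B (Python) =====
-- def split_by_similar(s):
--     res = []
--     cur = ''
--     for ch in s:
--         if cur and cur[0] == ch:
--             cur += ch
--         else:
--             if cur:
--                 res.append(cur)
--             cur = ch
--     if cur: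
--         res.append(cur)
--     return res
-- ===== Notes on version B (the rewrite author's own statement) =====
-- stated objective: simpler
-- what changed: Replaced A's nested index loops (outer pos pointer plus inner end-scan and slicing) by a single flat pass over the characters that grows a current-run accumulator and flushes it when the character changes.
import Mathlib
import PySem

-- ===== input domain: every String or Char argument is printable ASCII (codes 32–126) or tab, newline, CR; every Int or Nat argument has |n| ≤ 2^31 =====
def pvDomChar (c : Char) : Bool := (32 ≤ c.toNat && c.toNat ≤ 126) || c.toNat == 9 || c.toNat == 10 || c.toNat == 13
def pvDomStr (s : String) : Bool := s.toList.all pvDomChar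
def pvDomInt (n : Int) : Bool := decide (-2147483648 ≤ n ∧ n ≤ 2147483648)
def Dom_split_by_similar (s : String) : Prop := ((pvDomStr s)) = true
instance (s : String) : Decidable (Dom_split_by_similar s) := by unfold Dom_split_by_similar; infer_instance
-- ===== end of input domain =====

-- B replaces A's nested index loops (pos pointer + inner end-scan + slicing) by one flat pass
-- growing a current-run accumulator and flushing it on a character change (objective: simpler).

-- ===== PORT A =====
-- inner while loop: `while end < len(s) and s[end] == c: end += 1`
def pvAInner (cs : List Char) (c : Char) (e : Nat) : Nat :=
  if h : e < cs.length then
    if cs[e] = c then pvAInner cs c (e + 1) else e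
  else e
termination_by cs.length - e

-- `end` returned by the inner loop never moves left: needed for the outer loop's termination.
theorem pvAInner_ge (cs : List Char) (c : Char) (e : Nat) : e ≤ pvAInner cs c e := by
  unfold pvAInner
  split
  · split
    · have := pvAInner_ge cs c (e + 1); omega
    · exact Nat.le_refl e
  · exact Nat.le_refl e
termination_by cs.length - e

-- outer while loop: `while pos < len(s): …`; the slice s[pos:end] (0 ≤ pos ≤ end) is drop pos, take (end-pos)
def pvAOuter (cs : List Char) (pos : Nat) : List String :=
  if h : pos < cs.length then
    let c := cs[pos]
    let e := pvAInner cs c (pos + 1)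
    String.mk ((cs.drop pos).take (e - pos)) :: pvAOuter cs e
  else []
termination_by cs.length - pos
decreasing_by
  have := pvAInner_ge cs cs[pos] (pos + 1); omega

def split_by_similar (s : String) : List String := pvAOuter s.toList 0

-- ===== PORT B =====
-- one loop-body step: extend the current run `cur` if `ch` matches its first char, else flush it
-- (Python's string accumulator `cur` is List Char; ''-concatenation is ++ [ch], appended via String.mk at flush)
def pvBStep (res : List String) (cur : List Char) (ch : Char) : List String × List Char :=
  match cur with
  | c0 :: _ => if c0 == ch then (res, cur ++ [ch]) else (res ++ [String.mk cur], [ch])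
  | [] => (res, [ch])

def split_by_similar_alt (s : String) : List String :=
  let st := s.toList.foldl (fun st ch => pvBStep st.1 st.2 ch) ([], [])
  match st.2 with
  | [] => st.1
  | cur => st.1 ++ [String.mk cur]

-- ===== PRECONDITION & SPEC =====
def Spec_split_by_similar (s : String) (out : List String) : Prop := out = split_by_similar_alt s
instance (s : String) (out : List String) : Decidable (Spec_split_by_similar s out) := by unfold Spec_split_by_similar; infer_instance

-- ===== CLAIM (what is proved, stated in full; the proofs are below) =====
def Claim_equal_split_by_similar : Prop := ∀ (s : String), Dom_split_by_similar s → Spec_split_by_similar s (split_by_similar s)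

-- ===== LEMMAS AND PROOFS =====

-- reference grouping: list of maximal runs of equal consecutive characters
def pvGrp : List Char → List (List Char)
  | [] => []
  | c :: t => (c :: t.takeWhile (· == c)) :: pvGrp (t.dropWhile (· == c))
termination_by l => l.length
decreasing_by
  have := List.length_dropWhile_le (· == c) t; simp; omega

theorem pv_take_tw (l : List Char) (p : Char → Bool) : l.take (l.takeWhile p).length = l.takeWhile p := by
  have h : l = l.takeWhile p ++ l.dropWhile p := (List.takeWhile_append_dropWhile (p := p) (l := l)).symm
  calc l.take (l.takeWhile p).length = (l.takeWhile p ++ l.dropWhile p).take (l.takeWhile p).length := by rw [← h]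
    _ = l.takeWhile p := List.take_left ..

theorem pv_drop_tw (l : List Char) (p : Char → Bool) : l.drop (l.takeWhile p).length = l.dropWhile p := by
  have h : l = l.takeWhile p ++ l.dropWhile p := (List.takeWhile_append_dropWhile (p := p) (l := l)).symm
  calc l.drop (l.takeWhile p).length = (l.takeWhile p ++ l.dropWhile p).drop (l.takeWhile p).length := by rw [← h]
    _ = l.dropWhile p := List.drop_left ..

theorem pvAInner_eq (cs : List Char) (c : Char) (e : Nat) :
    pvAInner cs c e = e + ((cs.drop e).takeWhile (· == c)).length := by
  unfold pvAInner
  split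
  · rename_i h
    have hd : cs.drop e = cs[e] :: cs.drop (e + 1) := List.drop_eq_getElem_cons h
    split
    · rename_i heq
      have := pvAInner_eq cs c (e + 1)
      rw [this, hd]
      simp [List.takeWhile, heq]
      omega
    · rename_i hne
      have hb : (cs[e] == c) = false := beq_eq_false_iff_ne.mpr hne
      rw [hd]
      simp [List.takeWhile, hb]
  · rename_i h
    rw [List.drop_eq_nil_of_le (by omega)]
    simp
termination_by cs.length - e

theorem pvAOuter_eq (cs : List Char) (pos : Nat) :
    pvAOuter cs pos = (pvGrp (cs.drop pos)).map (fun g => String.mk g) := by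
  unfold pvAOuter
  split
  · rename_i h
    have hd : cs.drop pos = cs[pos] :: cs.drop (pos + 1) := List.drop_eq_getElem_cons h
    have hin := pvAInner_eq cs cs[pos] (pos + 1)
    set k := ((cs.drop (pos + 1)).takeWhile (· == cs[pos])).length with hk
    have he : pvAInner cs cs[pos] (pos + 1) = pos + 1 + k := hin
    have hrec := pvAOuter_eq cs (pvAInner cs cs[pos] (pos + 1))
    have htake : (cs.drop pos).take (pos + 1 + k - pos) = cs[pos] :: (cs.drop (pos + 1)).takeWhile (· == cs[pos]) := by
      rw [hd]
      have : pos + 1 + k - pos = k + 1 := by omega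
      rw [this, List.take_succ_cons, hk, pv_take_tw]
    have hdrop : cs.drop (pos + 1 + k) = (cs.drop (pos + 1)).dropWhile (· == cs[pos]) := by
      rw [← pv_drop_tw (cs.drop (pos + 1)) (· == cs[pos]), List.drop_drop, ← hk]
    show String.mk ((cs.drop pos).take (pvAInner cs cs[pos] (pos + 1) - pos)) ::
        pvAOuter cs (pvAInner cs cs[pos] (pos + 1)) = _
    rw [hrec, he, htake, hdrop]
    conv_rhs => rw [hd, pvGrp]
    simp
  · rename_i h
    rw [List.drop_eq_nil_of_le (by omega)]
    simp [pvGrp]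
termination_by cs.length - pos
decreasing_by
  have := pvAInner_ge cs cs[pos] (pos + 1); omega

-- B's fold with a nonempty current run headed by c0 produces that run extended by the
-- leading matches of the rest, followed by the runs of what remains.
theorem pvB_core (l : List Char) (res : List String) (c0 : Char) (cur : List Char) :
    (match (l.foldl (fun st ch => pvBStep st.1 st.2 ch) (res, c0 :: cur)).2 with
      | [] => (l.foldl (fun st ch => pvBStep st.1 st.2 ch) (res, c0 :: cur)).1
      | cur' => (l.foldl (fun st ch => pvBStep st.1 st.2 ch) (res, c0 :: cur)).1 ++ [String.mk cur']) =
    res ++ ((((c0 :: cur) ++ l.takeWhile (· == c0)) :: pvGrp (l.dropWhile (· == c0))).map (fun g => String.mk g)) := by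
  induction l generalizing res c0 cur with
  | nil => simp [pvGrp]
  | cons ch t ih =>
    by_cases hc : c0 = ch
    · subst hc
      have hstep : pvBStep res (c0 :: cur) c0 = (res, (c0 :: cur) ++ [c0]) := by
        simp [pvBStep]
      simp only [List.foldl_cons, hstep]
      have := ih res c0 (cur ++ [c0])
      simp only [List.cons_append] at this ⊢
      rw [this]
      simp [List.takeWhile, List.dropWhile]
    · have hb : (c0 == ch) = false := by simp [hc]
      have hstep : pvBStep res (c0 :: cur) ch = (res ++ [String.mk (c0 :: cur)], [ch]) := by
        simp [pvBStep, hb]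
      simp only [List.foldl_cons, hstep]
      have := ih (res ++ [String.mk (c0 :: cur)]) ch []
      simp only [List.cons_append, List.nil_append] at this
      rw [this]
      have hb2 : (ch == c0) = false := beq_eq_false_iff_ne.mpr (fun hh => hc hh.symm)
      have htw : List.takeWhile (fun x => x == c0) (ch :: t) = [] := by
        simp [hb2]
      have hdw : List.dropWhile (fun x => x == c0) (ch :: t) = ch :: t := by
        simp [hb2]
      rw [htw, hdw, pvGrp]
      simp

theorem split_by_similar_alt_eq (s : String) :
    split_by_similar_alt s = (pvGrp s.toList).map (fun g => String.mk g) := by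
  unfold split_by_similar_alt
  cases h : s.toList with
  | nil => simp [pvGrp]
  | cons c t =>
    show (match (t.foldl (fun st ch => pvBStep st.1 st.2 ch) ([], [c])).2 with
      | [] => (t.foldl (fun st ch => pvBStep st.1 st.2 ch) ([], [c])).1
      | cur' => (t.foldl (fun st ch => pvBStep st.1 st.2 ch) ([], [c])).1 ++ [String.mk cur']) = _
    rw [pvB_core t [] c [], pvGrp]
    simp

theorem split_by_similar_spec : Claim_equal_split_by_similar := by
  intro s _
  unfold Spec_split_by_similar
  rw [split_by_similar_alt_eq, split_by_similar, pvAOuter_eq]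
  simp
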